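-- pv_equiv track=rewrite | github.com/vladkostikov/HSP | entrance/tank_rush.py | TankRush
-- ===== SOURCE A (Python) =====
-- def TankRush(_rows1: int, _columns1: int, map_main: str, rows2: int, _columns2: int, map_tanks: str) -> bool:
--     main_map = map_main.split(" ")
--     tanks_map = map_tanks.split(" ")
--
--     for index_main_map, _v1 in enumerate(main_map):
--         counter = 0
--         for index_tanks_map, _v2 in enumerate(tanks_map):
--             if index_main_map + index_tanks_map > len(main_map) - 1:
--                 break
--             new_indexes = set(find_substrings_in_string(main_map[index_main_map + index_tanks_map], tanks_map[index_tanks_map]))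
--             if index_tanks_map == 0:
--                 indexes = new_indexes
--             if index_tanks_map > 0:
--                 indexes = indexes & new_indexes
--             if len(indexes) == 0:
--                 counter = 0
--                 break
--             if len(indexes) > 0:
--                 counter += 1
--             if counter >= rows2:
--                 return True
--
--     if counter >= rows2:
--         return True
--     return False
--
-- def find_substrings_in_string(string: str, substring: str) -> list:
--     indexes = []
--     for i, _v in enumerate(string):
--         index = string.find(substring, i)
--         if index >= 0 and index not in indexes:
--             indexes.append(index)
--     return indexes
-- ===== SOURCE B (Python) =====
-- def TankRush(_rows1: int, _columns1: int, map_main: str, rows2: int, _columns2: int, map_tanks: str) -> bool: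
--     if rows2 <= 0:
--         return True
--     main = map_main.split(" ")
--     tanks = map_tanks.split(" ")
--     if rows2 > len(tanks):
--         return False
--     anchor = tanks[0]
--     for s in range(len(main) - rows2 + 1):
--         row = main[s]
--         x = row.find(anchor)
--         while 0 <= x < len(row):
--             if all(x < len(main[s + t]) and main[s + t].startswith(tanks[t], x)
--                    for t in range(1, rows2)):
--                 return True
--             x = row.find(anchor, x + 1)
--     return False
-- ===== Notes on version B (the rewrite author's own statement) =====
-- stated objective: faster
-- what changed: B is candidate-and-verify: it enumerates occurrences of the first tank row with an advancing str.find and checks each candidate column directly with startswith on the following rows, using no occurrence sets, no intersections and no counter, and only scanning starts that leave room for rows2 rows.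
import Mathlib
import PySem

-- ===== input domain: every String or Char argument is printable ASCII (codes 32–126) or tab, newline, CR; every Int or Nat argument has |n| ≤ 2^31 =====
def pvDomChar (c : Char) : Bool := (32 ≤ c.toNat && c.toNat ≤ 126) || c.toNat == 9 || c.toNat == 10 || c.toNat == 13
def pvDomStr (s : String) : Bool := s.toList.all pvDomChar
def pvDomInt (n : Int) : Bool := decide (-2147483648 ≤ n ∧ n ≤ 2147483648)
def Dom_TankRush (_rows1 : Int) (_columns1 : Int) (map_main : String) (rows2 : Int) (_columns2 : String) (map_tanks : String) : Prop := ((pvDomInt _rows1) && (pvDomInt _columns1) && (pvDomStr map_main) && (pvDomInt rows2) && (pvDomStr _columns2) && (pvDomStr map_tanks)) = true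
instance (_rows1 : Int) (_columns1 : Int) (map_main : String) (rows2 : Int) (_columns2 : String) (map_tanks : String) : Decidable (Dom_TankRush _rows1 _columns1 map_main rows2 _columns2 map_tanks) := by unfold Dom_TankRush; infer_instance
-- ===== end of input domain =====

-- B replaces A's per-start intersection of occurrence-index sets by candidate-and-verify:
-- it enumerates anchors of the first tank row with an advancing find and checks the column
-- directly with startswith, using no sets at all: objective 'faster'
-- (a timing run measured it; A recomputes per-character find scans and dedup lists).

-- ===== PORT A =====
-- find_substrings_in_string: for i in enumerate(string): index = string.find(substring, i); collect new nonneg indexes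
def findSubs (s sub : String) : List Int :=
  (PySem.List.enumerate s.toList).foldl
    (fun idxs p =>
      let index := PySem.Str.findFrom s sub p.1
      if 0 ≤ index ∧ index ∉ idxs then idxs ++ [index] else idxs)
    []

-- the inner 'for index_tanks_map, _v2 in enumerate(tanks_map)' loop: rem = tanks_map[t:], counter/idxs the
-- Python locals; 'none' = the 'return True', 'some c' = loop left by break/exhaustion with counter = c.
-- (Python's 'indexes' is uninitialised before t = 0, but t = 0 always assigns it before any read, so [] is faithful.)
def innerA (main : List String) (rows2 : Int) (im : Nat) : List String → Nat → Int → List Int → Option Int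
  | [], _, counter, _ => some counter
  | tk :: rest, t, counter, idxs =>
    if (im : Int) + (t : Int) > (main.length : Int) - 1 then some counter
    else
      let nw : List Int := PySem.Set.ofList (findSubs (PySem.List.pyGetD main ((im : Int) + (t : Int)) "") tk)
      let idxs' := if t = 0 then nw else PySem.Set.inter idxs nw
      if idxs'.length = 0 then some 0
      else if rows2 ≤ counter + 1 then none
      else innerA main rows2 im rest (t + 1) (counter + 1) idxs'

-- the outer 'for index_main_map, _v1 in enumerate(main_map)' loop, threading counter to the final check
def outerA (main tanks : List String) (rows2 : Int) : List Nat → Int → Bool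
  | [], counter => decide (rows2 ≤ counter)
  | im :: rest, _ =>
    match innerA main rows2 im tanks 0 0 [] with
    | none => true
    | some c => outerA main tanks rows2 rest c

def TankRush (_rows1 : Int) (_columns1 : Int) (map_main : String) (rows2 : Int) (_columns2 : String) (map_tanks : String) : Bool :=
  let main := (PySem.Str.split? map_main " ").getD []    -- sep " " ≠ "", so split? is `some`
  let tanks := (PySem.Str.split? map_tanks " ").getD []
  outerA main tanks rows2 (List.range main.length) 0

-- ===== PORT B =====
-- 'all(x < len(main[s+t]) and main[s+t].startswith(tanks[t], x) for t in range(1, rows2))'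
-- (startswith(p, x) ported by hand as prefix-of-drop: exact since the guard gives 0 ≤ x < len(row))
def checkAt (main tanks : List String) (s rows2 x : Int) : Bool :=
  (PySem.List.pyRange 1 rows2 1).all (fun t =>
    let row := (PySem.List.pyGetD main (s + t) "").toList
    decide (x < (row.length : Int)) &&
      PySem.Chars.startswith (row.drop x.toNat) (PySem.List.pyGetD tanks t "").toList)

-- 'x = row.find(anchor); while 0 <= x < len(row): if all(...): return True; x = row.find(anchor, x+1)'
-- (fuel-bounded while loop; len(row) + 1 steps always suffice since x strictly increases)
def scanLoop (main tanks : List String) (rows2 s : Int) (row anchor : List Char) : Nat → Int → Bool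
  | 0, _ => false
  | fuel + 1, x =>
    if 0 ≤ x ∧ x < (row.length : Int) then
      if checkAt main tanks s rows2 x then true
      else scanLoop main tanks rows2 s row anchor fuel (PySem.Chars.findFrom row anchor (x + 1))
    else false

-- 'for s in range(len(main) - rows2 + 1): row = main[s]; … scan …'
def altOuter (main tanks : List String) (rows2 : Int) : List Int → Bool
  | [] => false
  | s :: rest =>
    let row := (PySem.List.pyGetD main s "").toList
    let anchor := (PySem.List.pyGetD tanks 0 "").toList
    if scanLoop main tanks rows2 s row anchor (row.length + 1) (PySem.Chars.find row anchor) then true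
    else altOuter main tanks rows2 rest

def TankRush_alt (_rows1 : Int) (_columns1 : Int) (map_main : String) (rows2 : Int) (_columns2 : String) (map_tanks : String) : Bool :=
  if rows2 ≤ 0 then true
  else
    let main := (PySem.Str.split? map_main " ").getD []    -- sep " " ≠ "", so split? is `some`
    let tanks := (PySem.Str.split? map_tanks " ").getD []
    if (tanks.length : Int) < rows2 then false
    else altOuter main tanks rows2 (PySem.List.pyRange 0 ((main.length : Int) - rows2 + 1) 1)

-- ===== PRECONDITION & SPEC =====
def Spec_TankRush (_rows1 : Int) (_columns1 : Int) (map_main : String) (rows2 : Int) (_columns2 : String) (map_tanks : String) (out : Bool) : Prop := out = TankRush_alt _rows1 _columns1 map_main rows2 _columns2 map_tanks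
instance (_rows1 : Int) (_columns1 : Int) (map_main : String) (rows2 : Int) (_columns2 : String) (map_tanks : String) (out : Bool) : Decidable (Spec_TankRush _rows1 _columns1 map_main rows2 _columns2 map_tanks out) := by unfold Spec_TankRush; infer_instance

-- ===== CLAIM (what is proved, stated in full; the proofs are below) =====
def Claim_equal_TankRush : Prop := ∀ (_rows1 : Int) (_columns1 : Int) (map_main : String) (rows2 : Int) (_columns2 : String) (map_tanks : String), Dom_TankRush _rows1 _columns1 map_main rows2 _columns2 map_tanks → Spec_TankRush _rows1 _columns1 map_main rows2 _columns2 map_tanks (TankRush _rows1 _columns1 map_main rows2 _columns2 map_tanks)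

-- ===== LEMMAS AND PROOFS =====

-- x is an occurrence position of sub in s that Python's scans record: 0 ≤ x < len(s), sub starts at x
def occMem (s sub : List Char) (x : Int) : Prop :=
  0 ≤ x ∧ x < (s.length : Int) ∧ sub <+: s.drop x.toNat

lemma find_of_prefix {t sub : List Char} (h : sub <+: t) : PySem.Chars.find t sub = 0 := by
  have h0 : 0 ≤ PySem.Chars.find t sub := (PySem.Chars.find_nonneg_iff t sub).mpr h.isInfix
  obtain ⟨-, hmin⟩ := PySem.Chars.find_spec h0
  by_contra hne
  have : 0 < (PySem.Chars.find t sub).toNat := by omega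
  exact hmin 0 this (by simpa using h)

lemma findFrom_occ_iff (s sub : List Char) (x : Int) :
    (∃ i : Int, 0 ≤ i ∧ i < (s.length : Int) ∧ 0 ≤ PySem.Chars.findFrom s sub i ∧
        PySem.Chars.findFrom s sub i = x) ↔ occMem s sub x := by
  constructor
  · rintro ⟨i, hi0, hilen, hr0, hrx⟩
    set k := i.toNat with hk
    have hik : i = (k : Int) := by omega
    have hkle : k ≤ s.length := by omega
    rw [hik] at hr0 hrx
    have hne : PySem.Chars.findFrom s sub (k : Int) ≠ -1 := by omega
    obtain ⟨hkr, hpre, -⟩ := PySem.Chars.findFrom_natCast_spec s sub k hkle hne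
    refine ⟨by omega, ?_, by rw [← hrx]; exact hpre⟩
    by_cases hs : sub = []
    · subst hs
      rw [PySem.Chars.findFrom_natCast s [] k hkle, PySem.Chars.find_nil] at hrx
      simp at hrx
      omega
    · by_contra hxl
      have hdrop : s.drop (PySem.Chars.findFrom s sub (k : Int)).toNat = [] := by
        apply List.drop_eq_nil_of_le
        omega
      rw [hrx] at hdrop hpre
      rw [hdrop] at hpre
      exact hs (List.prefix_nil.mp hpre)
  · rintro ⟨hx0, hxlen, hpre⟩
    refine ⟨x, hx0, hxlen, ?_⟩
    set k := x.toNat with hk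
    have hxk : x = (k : Int) := by omega
    have hkle : k ≤ s.length := by omega
    rw [hxk, PySem.Chars.findFrom_natCast s sub k hkle, find_of_prefix hpre]
    simp

lemma findSubs_fold (s sub : String) :
    ∀ (l : List (Int × Char)) (acc : List Int) (x : Int),
      (x ∈ l.foldl (fun idxs p =>
          let index := PySem.Str.findFrom s sub p.1
          if 0 ≤ index ∧ index ∉ idxs then idxs ++ [index] else idxs) acc ↔
        x ∈ acc ∨ ∃ p ∈ l, 0 ≤ PySem.Str.findFrom s sub p.1 ∧ PySem.Str.findFrom s sub p.1 = x) := by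
  intro l
  induction l with
  | nil => simp
  | cons hd tl ih =>
    intro acc x
    simp only [List.foldl_cons, ih, List.mem_cons]
    split_ifs with hc
    · simp only [List.mem_append, List.mem_singleton]
      constructor
      · rintro ((h | h) | h)
        · exact Or.inl h
        · exact Or.inr ⟨hd, Or.inl rfl, hc.1, h.symm⟩
        · obtain ⟨p, hp, h1, h2⟩ := h
          exact Or.inr ⟨p, Or.inr hp, h1, h2⟩
      · rintro (h | ⟨p, (rfl | hp), h1, h2⟩)
        · exact Or.inl (Or.inl h)
        · exact Or.inl (Or.inr h2.symm)
        · exact Or.inr ⟨p, hp, h1, h2⟩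
    · constructor
      · rintro (h | h)
        · exact Or.inl h
        · obtain ⟨p, hp, h1, h2⟩ := h
          exact Or.inr ⟨p, Or.inr hp, h1, h2⟩
      · rintro (h | ⟨p, (rfl | hp), h1, h2⟩)
        · exact Or.inl h
        · rcases Decidable.em (x ∈ acc) with hm | hm
          · exact Or.inl hm
          · exact absurd ⟨h1, by rwa [h2]⟩ hc
        · exact Or.inr ⟨p, hp, h1, h2⟩

lemma memA (s sub : String) (x : Int) :
    x ∈ PySem.Set.ofList (findSubs s sub) ↔ occMem s.toList sub.toList x := by
  rw [PySem.Set.mem_ofList]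
  unfold findSubs
  rw [findSubs_fold]
  simp only [List.not_mem_nil, false_or]
  rw [← findFrom_occ_iff s.toList sub.toList x]
  constructor
  · rintro ⟨p, hp, h1, h2⟩
    have hfst : p.1 ∈ (PySem.List.enumerate s.toList).map (·.1) := List.mem_map_of_mem hp
    rw [PySem.List.map_fst_enumerate] at hfst
    rw [PySem.List.mem_pyRange_one] at hfst
    simp only [PySem.Str.findFrom_eq] at h1 h2
    exact ⟨p.1, hfst.1, by simpa using hfst.2, h1, h2⟩
  · rintro ⟨i, hi0, hilen, h1, h2⟩
    have : i ∈ (PySem.List.enumerate s.toList).map (·.1) := by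
      rw [PySem.List.map_fst_enumerate, PySem.List.mem_pyRange_one]
      constructor
      · exact hi0
      · simpa using hilen
    obtain ⟨p, hp, hfst⟩ := List.mem_map.mp this
    exact ⟨p, hp, by simpa [PySem.Str.findFrom_eq, hfst] using ⟨h1, h2⟩⟩

lemma not_occ_ge_of_findFrom_neg_one {s sub : List Char} {k : Nat} (hkle : k ≤ s.length)
    (hneg : PySem.Chars.findFrom s sub (k : Int) = -1) :
    ∀ x : Int, occMem s sub x → (k : Int) ≤ x → False := by
  intro x ⟨hx0, hxl, hpre⟩ hkx
  have hninf : ¬ sub <:+: s.drop k :=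
    (PySem.Chars.findFrom_natCast_eq_neg_one_iff s sub k hkle).mp hneg
  apply hninf
  rw [← PySem.Chars.isIn_iff_infix, ← PySem.Chars.exists_prefix_drop_iff_isIn]
  refine ⟨x.toNat - k, ?_⟩
  rw [List.drop_drop]
  have : k + (x.toNat - k) = x.toNat := by omega
  rw [this]
  exact hpre

-- row u of the tank map matches row im+u of the main map at column x
def OccP (main tanks : List String) (im : Int) (u : Nat) (x : Int) : Prop :=
  occMem (PySem.List.pyGetD main (im + (u : Int)) "").toList (PySem.List.pyGetD tanks (u : Int) "").toList x

-- a tank-map match of height rows2 exists at main row im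
def Cond (main tanks : List String) (rows2 : Int) (im : Int) : Prop :=
  im + rows2 ≤ (main.length : Int) ∧ rows2 ≤ (tanks.length : Int) ∧
    ∃ x, ∀ u : Nat, (u : Int) < rows2 → OccP main tanks im u x

lemma innerA_bounds (main : List String) (rows2 : Int) (im : Nat) :
    ∀ (rem : List String) (t : Nat) (counter : Int) (idxs : List Int) (c : Int),
      0 ≤ counter → innerA main rows2 im rem t counter idxs = some c →
      0 ≤ c ∧ (counter < rows2 → c < rows2) := by
  intro rem
  induction rem with
  | nil =>
    intro t counter idxs c h0 h
    rw [innerA] at h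
    cases h
    exact ⟨h0, fun h => h⟩
  | cons tk rest ih =>
    intro t counter idxs c h0 h
    rw [innerA] at h
    by_cases hrange : (im : Int) + (t : Int) > (main.length : Int) - 1
    · rw [if_pos hrange] at h
      cases h
      exact ⟨h0, fun h => h⟩
    · rw [if_neg hrange] at h
      by_cases hempty : (if t = 0
            then PySem.Set.ofList (findSubs (PySem.List.pyGetD main ((im : Int) + (t : Int)) "") tk)
            else PySem.Set.inter idxs (PySem.Set.ofList (findSubs (PySem.List.pyGetD main ((im : Int) + (t : Int)) "") tk))).length = 0
      · rw [if_pos hempty] at h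
        cases h
        exact ⟨le_refl 0, fun h => by omega⟩
      · rw [if_neg hempty] at h
        by_cases hret : rows2 ≤ counter + 1
        · rw [if_pos hret] at h
          cases h
        · rw [if_neg hret] at h
          have := ih (t + 1) (counter + 1) _ c (by omega) h
          exact ⟨this.1, fun hlt => this.2 (by omega)⟩

lemma innerA_iff (main tanks : List String) (rows2 : Int) (im : Nat) :
    ∀ (rem : List String) (t : Nat) (idxs : List Int),
      rem = tanks.drop t → (t : Int) < rows2 →
      (1 ≤ t → ∀ x, (x ∈ idxs ↔ ∀ u : Nat, u < t → OccP main tanks (im : Int) u x)) →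
      (innerA main rows2 im rem t (t : Int) idxs = none ↔ Cond main tanks rows2 (im : Int)) := by
  intro rem
  induction rem with
  | nil =>
    intro t idxs hrem ht hmem
    have hlen : tanks.length ≤ t := by
      have := congrArg List.length hrem
      simp [List.length_drop] at this
      omega
    rw [innerA]
    simp only [reduceCtorEq, false_iff]
    rintro ⟨-, h2, -⟩
    omega
  | cons tk rest ih =>
    intro t idxs hrem ht hmem
    have htkq : tanks[t]? = some tk := by
      rw [← List.head?_drop, ← hrem]
      rfl
    have htk : PySem.List.pyGetD tanks (t : Int) "" = tk := by
      rw [PySem.List.pyGetD_natCast]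
      simp [List.getD, htkq]
    have htlen : t < tanks.length := (List.getElem?_eq_some_iff.mp htkq).1
    rw [innerA]
    by_cases hrange : (im : Int) + (t : Int) > (main.length : Int) - 1
    · rw [if_pos hrange]
      simp only [reduceCtorEq, false_iff]
      rintro ⟨h1, -, -⟩
      omega
    · rw [if_neg hrange]
      set S := (if t = 0
            then PySem.Set.ofList (findSubs (PySem.List.pyGetD main ((im : Int) + (t : Int)) "") tk)
            else PySem.Set.inter idxs (PySem.Set.ofList (findSubs (PySem.List.pyGetD main ((im : Int) + (t : Int)) "") tk))) with hS
      have hstep : ∀ x, (x ∈ S ↔ ∀ u : Nat, u < t + 1 → OccP main tanks (im : Int) u x) := by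
        intro x
        rw [hS]
        have hocc : (x ∈ PySem.Set.ofList (findSubs (PySem.List.pyGetD main ((im : Int) + (t : Int)) "") tk)
            ↔ OccP main tanks (im : Int) t x) := by
          rw [memA]
          unfold OccP
          rw [htk]
        by_cases ht0 : t = 0
        · subst ht0
          rw [if_pos rfl, hocc]
          constructor
          · intro h u hu
            have : u = 0 := by omega
            subst this; exact h
          · intro h; exact h 0 (by omega)
        · rw [if_neg ht0, PySem.Set.mem_inter, hmem (by omega) x, hocc]
          constructor
          · rintro ⟨ha, hb⟩ u hu
            rcases Nat.lt_or_ge u t with h | h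
            · exact ha u h
            · have : u = t := by omega
              subst this; exact hb
          · intro h
            exact ⟨fun u hu => h u (by omega), h t (by omega)⟩
      by_cases hempty : S.length = 0
      · rw [if_pos hempty]
        simp only [reduceCtorEq, false_iff]
        rintro ⟨-, -, x, hx⟩
        have hxmem := (hstep x).mpr (fun u hu => hx u (by exact_mod_cast by omega))
        rw [List.length_eq_zero_iff] at hempty
        rw [hempty] at hxmem
        simp at hxmem
      · rw [if_neg hempty]
        by_cases hret : rows2 ≤ (t : Int) + 1
        · rw [if_pos hret]
          have hr2 : rows2 = (t : Int) + 1 := by omega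
          simp only [true_iff]
          refine ⟨by omega, by omega, ?_⟩
          obtain ⟨x, hx⟩ := List.exists_mem_of_length_pos (l := S) (by omega)
          exact ⟨x, fun u hu => (hstep x).mp hx u (by omega)⟩
        · rw [if_neg hret]
          have hcast : (t : Int) + 1 = ((t + 1 : Nat) : Int) := by push_cast; ring
          rw [hcast]
          have hrest : rest = tanks.drop (t + 1) := by
            have h' : List.drop 1 (tanks.drop t) = rest := by rw [← hrem]; rfl
            rw [← h', List.drop_drop]
          exact ih (t + 1) _ hrest (by push_cast; omega) (fun _ x => hstep x)

lemma innerA_start_iff (main tanks : List String) (rows2 : Int) (im : Nat) (h1 : 1 ≤ rows2) :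
    innerA main rows2 im tanks 0 0 [] = none ↔ Cond main tanks rows2 (im : Int) := by
  have h := innerA_iff main tanks rows2 im tanks 0 []
    (by simp) (by exact_mod_cast h1) (fun h => absurd h (by omega))
  simpa using h

lemma outerA_nonpos (main tanks : List String) (rows2 : Int) (h0 : rows2 ≤ 0) :
    ∀ (l : List Nat) (c : Int), 0 ≤ c → outerA main tanks rows2 l c = true := by
  intro l
  induction l with
  | nil => intro c hc; rw [outerA]; simp; omega
  | cons im rest ih =>
    intro c hc
    rw [outerA]
    cases h : innerA main rows2 im tanks 0 0 [] with
    | none => rfl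
    | some c' => exact ih c' (innerA_bounds main rows2 im tanks 0 0 [] c' (le_refl 0) h).1

lemma outerA_true_iff (main tanks : List String) (rows2 : Int) (h1 : 1 ≤ rows2) :
    ∀ (l : List Nat) (c : Int), c < rows2 →
      (outerA main tanks rows2 l c = true ↔ ∃ im ∈ l, innerA main rows2 im tanks 0 0 [] = none) := by
  intro l
  induction l with
  | nil =>
    intro c hc
    rw [outerA]
    simp
    omega
  | cons im rest ih =>
    intro c hc
    rw [outerA]
    cases h : innerA main rows2 im tanks 0 0 [] with
    | none =>
      simp only [true_iff]
      exact ⟨im, by simp, h⟩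
    | some c' =>
      have hb := innerA_bounds main rows2 im tanks 0 0 [] c' (le_refl 0) h
      rw [ih c' (hb.2 (by omega))]
      constructor
      · rintro ⟨im', h1', h2'⟩
        exact ⟨im', List.mem_cons_of_mem _ h1', h2'⟩
      · rintro ⟨im', h1', h2'⟩
        rcases List.mem_cons.mp h1' with rfl | hmem
        · rw [h] at h2'; cases h2'
        · exact ⟨im', hmem, h2'⟩

-- checkAt says: every later tank row matches at column x
lemma checkAt_iff (main tanks : List String) (s rows2 x : Int) (hx : 0 ≤ x) :
    checkAt main tanks s rows2 x = true ↔
      ∀ u : Nat, 1 ≤ u → (u : Int) < rows2 → OccP main tanks s u x := by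
  unfold checkAt
  rw [List.all_eq_true]
  constructor
  · intro h u hu1 hu2
    have hm : (u : Int) ∈ PySem.List.pyRange 1 rows2 1 := by
      rw [PySem.List.mem_pyRange_one]
      exact ⟨by exact_mod_cast hu1, hu2⟩
    have := h _ hm
    simp only [Bool.and_eq_true, decide_eq_true_eq] at this
    unfold OccP occMem
    rw [PySem.Chars.startswith_iff] at this
    exact ⟨hx, this.1, this.2⟩
  · intro h t ht
    rw [PySem.List.mem_pyRange_one] at ht
    have htn : t = ((t.toNat : Nat) : Int) := by omega
    have := h t.toNat (by omega) (by omega)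
    unfold OccP occMem at this
    rw [← htn] at this
    simp only [Bool.and_eq_true, decide_eq_true_eq]
    rw [PySem.Chars.startswith_iff]
    exact ⟨this.2.1, this.2.2⟩

-- the while loop finds exactly: some occurrence x ≥ k of anchor in row passing checkAt
lemma scanLoop_iff (main tanks : List String) (rows2 s : Int) (row anchor : List Char) :
    ∀ (fuel k : Nat), k ≤ row.length → row.length - k < fuel →
      (scanLoop main tanks rows2 s row anchor fuel (PySem.Chars.findFrom row anchor (k : Int)) = true ↔
        ∃ x, occMem row anchor x ∧ (k : Int) ≤ x ∧ checkAt main tanks s rows2 x = true) := by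
  intro fuel
  induction fuel with
  | zero => intro k hkle hf; omega
  | succ f ih =>
    intro k hkle hf
    set r := PySem.Chars.findFrom row anchor (k : Int) with hr
    by_cases hneg : r = -1
    · rw [scanLoop, if_neg (by omega)]
      have hno := not_occ_ge_of_findFrom_neg_one hkle (hr ▸ hneg)
      simp only [Bool.false_eq_true, false_iff]
      rintro ⟨x, ho, hkx, -⟩
      exact hno x ho hkx
    · obtain ⟨hkr, hpre, hmin⟩ := PySem.Chars.findFrom_natCast_spec row anchor k hkle hneg
      have hrlen : r ≤ (row.length : Int) := by
        rw [hr, PySem.Chars.findFrom_natCast row anchor k hkle]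
        have := PySem.Chars.find_le_length (row.drop k) anchor
        have hlen : ((row.drop k).length : Int) = (row.length : Int) - k := by
          simp; omega
        split
        · omega
        · omega
      by_cases hrl : r < (row.length : Int)
      · have hocc_r : occMem row anchor r := ⟨by omega, hrl, hpre⟩
        rw [scanLoop, if_pos ⟨by omega, hrl⟩]
        by_cases hchk : checkAt main tanks s rows2 r = true
        · rw [if_pos hchk]
          simp only [true_iff]
          exact ⟨r, hocc_r, by omega, hchk⟩
        · rw [if_neg hchk]
          have hr1 : r + 1 = ((r.toNat + 1 : Nat) : Int) := by omega
          rw [hr1, ih (r.toNat + 1) (by omega) (by omega)]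
          constructor
          · rintro ⟨x, ho, hkx, hc⟩
            exact ⟨x, ho, by omega, hc⟩
          · rintro ⟨x, ho, hkx, hc⟩
            rcases lt_trichotomy x r with hlt | heq | hgt
            · exfalso
              exact hmin x.toNat (by omega) (by omega) ho.2.2
            · exact absurd (heq ▸ hc) hchk
            · exact ⟨x, ho, by omega, hc⟩
      · -- r = len(row): only possible for anchor = [] with k = len(row); the guard fails
        rw [scanLoop, if_neg (fun h => hrl h.2)]
        have hreq : r = (row.length : Int) := by omega
        have hsub : anchor = [] := by
          by_contra hs
          have hdrop : row.drop r.toNat = [] := List.drop_eq_nil_of_le (by omega)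
          rw [hdrop] at hpre
          exact hs (List.prefix_nil.mp hpre)
        have hkeq : (k : Int) = r := by
          rw [hr, PySem.Chars.findFrom_natCast row anchor k hkle, hsub, PySem.Chars.find_nil]
          simp
        simp only [Bool.false_eq_true, false_iff]
        rintro ⟨x, ho, hkx, -⟩
        have := ho.2.1
        omega

lemma altOuter_true_iff (main tanks : List String) (rows2 : Int) :
    ∀ (l : List Int),
      (altOuter main tanks rows2 l = true ↔
        ∃ s ∈ l, ∃ x, occMem (PySem.List.pyGetD main s "").toList (PySem.List.pyGetD tanks 0 "").toList x ∧
          checkAt main tanks s rows2 x = true) := by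
  intro l
  induction l with
  | nil => rw [altOuter]; simp
  | cons s rest ih =>
    rw [altOuter]
    have hscan := scanLoop_iff main tanks rows2 s
      (PySem.List.pyGetD main s "").toList (PySem.List.pyGetD tanks 0 "").toList
      ((PySem.List.pyGetD main s "").toList.length + 1) 0 (by omega) (by omega)
    rw [Nat.cast_zero, PySem.Chars.findFrom_zero] at hscan
    split_ifs with h
    · simp only [true_iff]
      refine ⟨s, List.mem_cons_self, ?_⟩
      obtain ⟨x, ho, -, hc⟩ := hscan.mp h
      exact ⟨x, ho, hc⟩
    · rw [ih]
      constructor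
      · rintro ⟨s', h1', h2'⟩
        exact ⟨s', List.mem_cons_of_mem _ h1', h2'⟩
      · rintro ⟨s', h1', h2'⟩
        rcases List.mem_cons.mp h1' with rfl | hmem
        · obtain ⟨x, ho, hc⟩ := h2'
          exact absurd (hscan.mpr ⟨x, ho, ho.1, hc⟩) h
        · exact ⟨s', hmem, h2'⟩

-- the ∃-x characterisations of the two sides coincide
lemma exists_match_iff (main tanks : List String) (rows2 s : Int) (h1 : 1 ≤ rows2) :
    (∃ x, occMem (PySem.List.pyGetD main s "").toList (PySem.List.pyGetD tanks 0 "").toList x ∧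
        checkAt main tanks s rows2 x = true) ↔
      ∃ x, ∀ u : Nat, (u : Int) < rows2 → OccP main tanks s u x := by
  constructor
  · rintro ⟨x, ho, hc⟩
    refine ⟨x, fun u hu => ?_⟩
    rcases Nat.eq_zero_or_pos u with rfl | hu1
    · unfold OccP
      simpa using ho
    · exact (checkAt_iff main tanks s rows2 x ho.1).mp hc u hu1 hu
  · rintro ⟨x, hx⟩
    have h0 := hx 0 (by omega)
    unfold OccP at h0
    simp only [Nat.cast_zero, add_zero] at h0
    exact ⟨x, h0, (checkAt_iff main tanks s rows2 x h0.1).mpr (fun u hu1 hu2 => hx u hu2)⟩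

lemma core (main tanks : List String) (rows2 : Int) :
    outerA main tanks rows2 (List.range main.length) 0 =
      (if rows2 ≤ 0 then true
       else if (tanks.length : Int) < rows2 then false
       else altOuter main tanks rows2 (PySem.List.pyRange 0 ((main.length : Int) - rows2 + 1) 1)) := by
  by_cases h0 : rows2 ≤ 0
  · rw [if_pos h0]
    exact outerA_nonpos main tanks rows2 h0 _ 0 (le_refl 0)
  · rw [if_neg h0]
    have h1 : (1 : Int) ≤ rows2 := by omega
    have hA := outerA_true_iff main tanks rows2 h1 (List.range main.length) 0 (by omega)
    by_cases htk : (tanks.length : Int) < rows2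
    · rw [if_pos htk, Bool.eq_false_iff]
      intro h
      rw [hA] at h
      obtain ⟨im, -, hnone⟩ := h
      rw [innerA_start_iff main tanks rows2 im h1] at hnone
      exact absurd hnone.2.1 (by omega)
    · rw [if_neg htk, Bool.eq_iff_iff, hA, altOuter_true_iff]
      constructor
      · rintro ⟨im, him, hnone⟩
        rw [innerA_start_iff main tanks rows2 im h1] at hnone
        obtain ⟨hlen, -, x⟩ := hnone
        refine ⟨(im : Int), ?_, ?_⟩
        · rw [PySem.List.mem_pyRange_one]
          constructor
          · omega
          · omega
        · exact (exists_match_iff main tanks rows2 (im : Int) h1).mpr ⟨x.choose, x.choose_spec⟩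
      · rintro ⟨st, hst, hmatch⟩
        rw [PySem.List.mem_pyRange_one] at hst
        have hstnat : st = ((st.toNat : Nat) : Int) := by omega
        refine ⟨st.toNat, List.mem_range.mpr (by omega), ?_⟩
        rw [innerA_start_iff main tanks rows2 st.toNat h1]
        obtain ⟨x, hx⟩ := (exists_match_iff main tanks rows2 st h1).mp hmatch
        refine ⟨by omega, by omega, x, fun u hu => ?_⟩
        rw [← hstnat]
        exact hx u hu

-- ===== VERDICT (by name: the statement is the Claim_ definition above) =====
theorem TankRush_spec : Claim_equal_TankRush := by
  intro _rows1 _columns1 map_main rows2 _columns2 map_tanks _hdom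
  unfold Spec_TankRush TankRush TankRush_alt
  exact core _ _ rows2
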